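-- pv_equiv track=rewrite | github.com/1ordhokage/GP_homework | 3-scope-sequence/main.py | lexicographically_minimal
-- ===== SOURCE A (Python) =====
-- def lexicographically_minimal(
--         sequence: list[str],
--         n: int,
--         index: int,
--         weight: int
-- ) -> list[str]:
--     """Function that makes sequence's suffix lexicographically minimal.
--         Args:
--             sequence: Scope sequence.
--             n: Half the number of source sequence length.
--             index: Opening brace index to replace.
--             weight: Difference between numbers of opening and closing braces.
--         Returns:
--             list[str]: Sequence with lexicographically minimal suffix.
--      """
--     for i in range(index + 1, 2 * n):
--         opening_brace_condition = i <= (2 * n + index + weight) / 2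
--         sequence[i] = "(" if opening_brace_condition else ")"
--     return sequence
-- ===== SOURCE B (Python) =====
-- def lexicographically_minimal(
--         sequence: list[str],
--         n: int,
--         index: int,
--         weight: int
-- ) -> list[str]:
--     """Fill the suffix after `index` with one block of '(' then one block of ')':
--     the boundary is computed once in closed form instead of testing every position."""
--     end = 2 * n
--     if index + 1 < end:
--         cut = min((end + index + weight) // 2, end - 1)
--         opens = max(cut - index, 0)
--         sequence[index + 1:end] = ["("] * opens + [")"] * (end - 1 - index - opens)
--     return sequence
-- ===== Notes on version B (the rewrite author's own statement) =====
-- stated objective: simpler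
-- what changed: B computes the opening/closing boundary once in closed form ((2n+index+weight)//2, clamped) and fills the suffix with two replicated blocks via a single slice assignment, instead of A's loop that re-tests the boundary condition at every position.
-- outside the precondition, e.g. on lexicographically_minimal(['x', 'y'], 1, -2, 0): A returns ['(', ')'], B returns ['x', '(', '(', ')']
import Mathlib
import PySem

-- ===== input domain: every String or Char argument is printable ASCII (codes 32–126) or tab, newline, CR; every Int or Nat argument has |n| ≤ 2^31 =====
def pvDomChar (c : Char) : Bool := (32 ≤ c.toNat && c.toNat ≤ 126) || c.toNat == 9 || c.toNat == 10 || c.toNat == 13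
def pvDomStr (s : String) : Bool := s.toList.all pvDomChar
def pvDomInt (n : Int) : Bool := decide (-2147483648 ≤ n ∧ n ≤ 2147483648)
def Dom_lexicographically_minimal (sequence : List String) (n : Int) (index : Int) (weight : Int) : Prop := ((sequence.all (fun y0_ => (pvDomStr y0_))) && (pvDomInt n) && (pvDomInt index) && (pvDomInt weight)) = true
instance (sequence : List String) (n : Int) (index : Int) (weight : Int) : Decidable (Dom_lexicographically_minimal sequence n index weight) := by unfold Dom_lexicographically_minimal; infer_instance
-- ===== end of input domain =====

-- B replaces A's per-position loop (testing the boundary condition at every index) by one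
-- closed-form boundary computation and two block fills via a single slice assignment (objective: simpler).
-- Both A and B mutate `sequence` in place in Python; the equivalence proved here is about the return value.

-- ===== PORT A =====
-- Python's `i <= (2*n + index + weight) / 2` is a float comparison; for integer i and
-- |operands| ≤ 2^33 it is exactly `i ≤ (2*n + index + weight) // 2` (floor division), ported so.
def lexicographically_minimal (sequence : List String) (n : Int) (index : Int) (weight : Int) : List String :=
  (PySem.List.pyRange (index + 1) (2 * n) 1).foldl
    (fun seq i =>
      PySem.List.pySetD seq i
        (if i ≤ PySem.Int.floordiv (2 * n + index + weight) 2 then "(" else ")"))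
    sequence

-- ===== PORT B =====
-- Source B: slice assignment sequence[index+1:end] = ["("]*opens + [")"]*rest, rendered as
-- sequence[:index+1] ++ blocks ++ sequence[end:] (exact for list slice assignment of equal extent).
def lexicographically_minimal_alt (sequence : List String) (n : Int) (index : Int) (weight : Int) : List String :=
  let e := 2 * n
  if index + 1 < e then
    let cut := min (PySem.Int.floordiv (e + index + weight) 2) (e - 1)
    let opens := max (cut - index) 0
    PySem.List.slice sequence none (some (index + 1)) ++
      (List.replicate opens.toNat "(" ++ List.replicate (e - 1 - index - opens).toNat ")") ++
      PySem.List.slice sequence (some e) none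
  else sequence

-- ===== PRECONDITION & SPEC =====
-- Pre_ restricts a non-empty fill (index+1 < 2n) to the function's natural domain
-- 0 ≤ index+1 and 2n ≤ len(sequence): outside it A either raises IndexError or writes
-- through negative-index wraparound into the prefix, which B's slice assignment does not do.
def Pre_lexicographically_minimal (sequence : List String) (n : Int) (index : Int) (weight : Int) : Prop :=
  index + 1 < 2 * n → (0 ≤ index + 1 ∧ 2 * n ≤ (sequence.length : Int))
instance (sequence : List String) (n : Int) (index : Int) (weight : Int) : Decidable (Pre_lexicographically_minimal sequence n index weight) := by unfold Pre_lexicographically_minimal; infer_instance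
def pvWitness_lexicographically_minimal : List String × Int × Int × Int := ((["(", ")", "(", ")"], 2, 0, 0))

def Spec_lexicographically_minimal (sequence : List String) (n : Int) (index : Int) (weight : Int) (out : List String) : Prop := out = lexicographically_minimal_alt sequence n index weight
instance (sequence : List String) (n : Int) (index : Int) (weight : Int) (out : List String) : Decidable (Spec_lexicographically_minimal sequence n index weight out) := by unfold Spec_lexicographically_minimal; infer_instance

-- ===== CLAIM (what is proved, stated in full; the proofs are below) =====
def Claim_equal_lexicographically_minimal : Prop := ∀ (sequence : List String) (n : Int) (index : Int) (weight : Int), Dom_lexicographically_minimal sequence n index weight → Pre_lexicographically_minimal sequence n index weight → Spec_lexicographically_minimal sequence n index weight (lexicographically_minimal sequence n index weight)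

-- ===== LEMMAS AND PROOFS =====

lemma setfold_getElem? (f : Int → String) : ∀ (l : List Int) (xs : List String),
    (∀ i ∈ l, 0 ≤ i ∧ i < (xs.length : Int)) → l.Nodup → ∀ (j : Nat),
    (l.foldl (fun s i => PySem.List.pySetD s i (f i)) xs)[j]? =
      if (j : Int) ∈ l then some (f j) else xs[j]? := by
  intro l
  induction l with
  | nil => intro xs _ _ j; simp
  | cons i t ih =>
    intro xs hmem hnd j
    obtain ⟨hi0, hilen⟩ := hmem i (List.mem_cons_self ..)
    have hset : PySem.List.pySetD xs i (f i) = xs.set i.toNat (f i) :=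
      PySem.List.pySetD_of_nonneg xs (f i) hi0
    have hlen : (xs.set i.toNat (f i)).length = xs.length := by simp
    simp only [List.foldl_cons, hset]
    rw [ih (xs.set i.toNat (f i))
        (by intro a ha; rw [hlen]; exact hmem a (List.mem_cons_of_mem _ ha))
        hnd.of_cons j]
    by_cases hjt : (j : Int) ∈ t
    · simp [hjt]
    · by_cases hji : (j : Int) = i
      · have hj : j = i.toNat := by omega
        rw [if_neg hjt, hj, List.getElem?_set_self (by omega)]
        rw [if_pos (by simp only [Int.toNat_of_nonneg hi0]; exact List.mem_cons_self ..)]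
        congr 2
        omega
      · rw [if_neg hjt, List.getElem?_set_ne (by omega)]
        rw [if_neg (by intro hx; rcases List.mem_cons.mp hx with h | h; exact hji h; exact hjt h)]

-- pointwise description of B's output (in the non-trivial case)
lemma alt_getElem? (sequence : List String) (n index weight : Int)
    (h1 : index + 1 < 2 * n) (h2 : 0 ≤ index + 1) (h3 : 2 * n ≤ (sequence.length : Int)) (j : Nat) :
    (lexicographically_minimal_alt sequence n index weight)[j]? =
      if index + 1 ≤ (j : Int) ∧ (j : Int) < 2 * n then
        some (if (j : Int) ≤ PySem.Int.floordiv (2 * n + index + weight) 2 then "(" else ")")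
      else sequence[j]? := by
  unfold lexicographically_minimal_alt
  simp only [if_pos h1]
  set c := PySem.Int.floordiv (2 * n + index + weight) 2 with hc
  rw [PySem.List.slice_to sequence h2, PySem.List.slice_from sequence (by omega : (0:Int) ≤ 2 * n)]
  set cut := min c (2 * n - 1) with hcut
  set opens := max (cut - index) 0 with hopens
  have hco : cut ≤ 2 * n - 1 := by omega
  have hop0 : 0 ≤ opens := by omega
  have hop1 : opens ≤ 2 * n - 1 - index := by omega
  have hA : (List.take (index + 1).toNat sequence).length = (index + 1).toNat := by
    rw [List.length_take]; omega
  have hB : (List.replicate opens.toNat ("(" : String)).length = opens.toNat :=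
    List.length_replicate
  have hC : (List.replicate (2 * n - 1 - index - opens).toNat (")" : String)).length
      = (2 * n - 1 - index - opens).toNat := List.length_replicate
  rw [List.append_assoc, List.append_assoc]
  by_cases hz1 : j < (index + 1).toNat
  · rw [List.getElem?_append_left (by rw [hA]; omega)]
    rw [List.getElem?_take_of_lt (by omega)]
    rw [if_neg (by omega)]
  · rw [List.getElem?_append_right (by rw [hA]; omega), hA]
    by_cases hz2 : j - (index + 1).toNat < opens.toNat
    · rw [List.getElem?_append_left (by rw [hB]; omega)]
      rw [List.getElem?_replicate, if_pos (by omega)]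
      rw [if_pos (by constructor <;> omega)]
      congr 1
      rw [if_pos (by omega)]
    · rw [List.getElem?_append_right (by rw [hB]; omega), hB]
      by_cases hz3 : j - (index + 1).toNat - opens.toNat < (2 * n - 1 - index - opens).toNat
      · rw [List.getElem?_append_left (by rw [hC]; omega)]
        rw [List.getElem?_replicate, if_pos (by omega)]
        rw [if_pos (by constructor <;> omega)]
        congr 1
        rw [if_neg (by omega)]
      · rw [List.getElem?_append_right (by rw [hC]; omega), hC]
        rw [List.getElem?_drop]
        rw [if_neg (by omega)]
        congr 1
        omega

-- ===== VERDICT (by name: the statement is the Claim_ definition above) =====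
theorem lexicographically_minimal_spec : Claim_equal_lexicographically_minimal := by
  intro sequence n index weight _ hpre
  unfold Spec_lexicographically_minimal
  by_cases h : index + 1 < 2 * n
  · obtain ⟨h2, h3⟩ := hpre h
    apply List.ext_getElem?
    intro j
    unfold lexicographically_minimal
    rw [setfold_getElem? _ _ _
        (by intro i hi
            rw [PySem.List.mem_pyRange_one] at hi
            constructor <;> omega)
        (PySem.List.nodup_pyRange_one ..) j]
    rw [alt_getElem? sequence n index weight h h2 h3 j]
    by_cases hm : index + 1 ≤ (j : Int) ∧ (j : Int) < 2 * n
    · rw [if_pos ((PySem.List.mem_pyRange_one ..).mpr hm), if_pos hm]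
    · rw [if_neg (fun hx => hm ((PySem.List.mem_pyRange_one ..).mp hx)), if_neg hm]
  · unfold lexicographically_minimal lexicographically_minimal_alt
    rw [PySem.List.pyRange_one_eq_nil (by omega)]
    simp [h]
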